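-- pv_equiv track=rewrite | github.com/francozaina/IntProgPython | repaso.py | vocales_distintas
-- ===== SOURCE A (Python) =====
-- def vocales_distintas(palabra:str)->bool:
--     vocales = ['a','e','i','o','u']
--     for letra in palabra:
--         if letra in vocales :
--             vocales.remove(letra)
--     if len(vocales) <= 2:
--         return True
--     else:
--         return False
-- ===== SOURCE B (Python) =====
-- def vocales_distintas(palabra: str) -> bool:
--     return len({'a', 'e', 'i', 'o', 'u'} & set(palabra)) >= 3
-- ===== Notes on version B (the rewrite author's own statement) =====
-- stated objective: idiomatic
-- what changed: Replaces the scan-and-remove loop over a depleting vowel list with a single set intersection: distinct vowels present are counted as len(vowelset & set(palabra)) >= 3, with no loop, mutation or if/else; the C-level set operations give a measured constant-factor speedup.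
import Mathlib
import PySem

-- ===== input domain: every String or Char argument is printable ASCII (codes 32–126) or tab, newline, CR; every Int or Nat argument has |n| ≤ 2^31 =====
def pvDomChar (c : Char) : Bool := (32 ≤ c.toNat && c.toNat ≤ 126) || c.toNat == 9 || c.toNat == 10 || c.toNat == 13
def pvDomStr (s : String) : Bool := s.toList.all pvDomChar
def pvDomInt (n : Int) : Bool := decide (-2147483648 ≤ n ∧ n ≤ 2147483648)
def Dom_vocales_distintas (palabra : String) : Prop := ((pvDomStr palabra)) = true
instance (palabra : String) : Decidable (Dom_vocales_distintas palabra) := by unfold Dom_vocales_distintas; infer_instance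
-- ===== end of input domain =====

-- B replaces the scan-and-remove loop with a set intersection (idiomatic; same cost).

-- ===== PORT A =====
def vocales_distintas (palabra : String) : Bool :=
  let vocales : List Char := ['a', 'e', 'i', 'o', 'u']
  let vocales := palabra.toList.foldl (fun vocales letra =>
    if vocales.contains letra then (PySem.List.remove? vocales letra).getD vocales
    else vocales) vocales
  decide (vocales.length ≤ 2)

-- ===== PORT B =====
def vocales_distintas_alt (palabra : String) : Bool :=
  decide (3 ≤ (PySem.Set.inter (PySem.Set.ofList ['a', 'e', 'i', 'o', 'u'])
      (PySem.Set.ofList palabra.toList)).length)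

-- ===== PRECONDITION & SPEC =====
def Spec_vocales_distintas (palabra : String) (out : Bool) : Prop := out = vocales_distintas_alt palabra
instance (palabra : String) (out : Bool) : Decidable (Spec_vocales_distintas palabra out) := by unfold Spec_vocales_distintas; infer_instance

-- ===== CLAIM (what is proved, stated in full; the proofs are below) =====
def Claim_equal_vocales_distintas : Prop := ∀ (palabra : String), Dom_vocales_distintas palabra → Spec_vocales_distintas palabra (vocales_distintas palabra)

-- ===== LEMMAS AND PROOFS =====

-- A's loop on a duplicate-free vowel list keeps exactly the vowels not occurring in the scanned text.
theorem foldA_eq_filter (l : List Char) :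
    ∀ (v : List Char), v.Nodup →
      l.foldl (fun vocales letra =>
        if vocales.contains letra then (PySem.List.remove? vocales letra).getD vocales
        else vocales) v = v.filter (fun c => !(l.contains c)) := by
  induction l with
  | nil => intro v _; simp
  | cons x xs ih =>
    intro v hv
    rw [List.foldl_cons]
    by_cases hx : x ∈ v
    · have hc : v.contains x = true := by simpa using hx
      rw [hc, if_pos rfl, PySem.List.remove?_eq_some_erase v x hx, Option.getD_some,
        ih _ (hv.erase x), List.Nodup.erase_eq_filter hv, List.filter_filter]
      apply List.filter_congr
      intro c _
      by_cases h : c = x <;> simp [h]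
    · have hc : v.contains x = false := by simpa using hx
      rw [hc, if_neg Bool.false_ne_true, ih v hv]
      apply List.filter_congr
      intro c hcv
      have h : c ≠ x := fun h => hx (h ▸ hcv)
      simp [h]

theorem vocales_distintas_eq (palabra : String) :
    vocales_distintas palabra =
      decide ((['a','e','i','o','u'].filter
        (fun c => !(palabra.toList.contains c))).length ≤ 2) := by
  have h : vocales_distintas palabra =
      decide ((palabra.toList.foldl (fun vocales letra =>
        if vocales.contains letra then (PySem.List.remove? vocales letra).getD vocales
        else vocales) ['a','e','i','o','u']).length ≤ 2) := rfl
  rw [h, foldA_eq_filter _ _ (by decide)]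

theorem alt_eq (palabra : String) :
    vocales_distintas_alt palabra =
      decide (3 ≤ (['a','e','i','o','u'].filter
        (fun c => palabra.toList.contains c)).length) := by
  have h1 : PySem.Set.ofList (['a','e','i','o','u'] : List Char) = ['a','e','i','o','u'] := by decide
  have h2 : PySem.Set.inter (['a','e','i','o','u'] : List Char) (PySem.Set.ofList palabra.toList)
      = ['a','e','i','o','u'].filter (fun c => palabra.toList.contains c) := by
    apply List.filter_congr
    intro c _
    simp [PySem.Set.contains, List.contains_eq_mem, PySem.Set.mem_ofList]
  unfold vocales_distintas_alt
  rw [h1, h2]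

-- ===== VERDICT (by name: the statement is the Claim_ definition above) =====
theorem vocales_distintas_spec : Claim_equal_vocales_distintas := by
  intro palabra _
  unfold Spec_vocales_distintas
  rw [vocales_distintas_eq, alt_eq]
  by_cases ha : 'a' ∈ palabra.toList <;>
  by_cases he : 'e' ∈ palabra.toList <;>
  by_cases hi : 'i' ∈ palabra.toList <;>
  by_cases ho : 'o' ∈ palabra.toList <;>
  by_cases hu : 'u' ∈ palabra.toList <;>
    simp [List.filter, List.contains_eq_mem, ha, he, hi, ho, hu]
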